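-- pv_equiv track=rewrite | github.com/yanzhenxing123/algorithms | 秋招笔试/美团/triplet_count_optimized.py | count_triplets_optimized
-- ===== SOURCE A (Python) =====
-- def count_triplets_optimized(arr):
--     """
--     优化版本：计算满足条件的三元组数量
--     条件：1 ≤ i < j < k ≤ n 且 ai > ak > aj
--     时间复杂度：O(n²)
--     """
--     n = len(arr)
--     count = 0
--
--     # 对于每个位置j
--     for j in range(1, n - 1):
--         aj = arr[j]
--
--         # 预处理：统计左边大于aj的元素
--         left_greater = []
--         for i in range(j):
--             if arr[i] > aj:
--                 left_greater.append(arr[i])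
--
--         # 预处理：统计右边大于aj的元素
--         right_greater = []
--         for k in range(j + 1, n):
--             if arr[k] > aj:
--                 right_greater.append(arr[k])
--
--         # 对于每个左边的元素ai
--         for ai in left_greater:
--             # 统计右边大于aj且小于ai的元素数量
--             for ak in right_greater:
--                 if ak < ai:
--                     count += 1
--
--     return count
-- ===== SOURCE B (Python) =====
-- def count_triplets_optimized(arr):
--     """O(n^2): sweep j left to right, maintaining greater_before[k] =
--     number of i < j with arr[i] > arr[k]; for each middle j add the counts
--     for the valid right endpoints k."""
--     n = len(arr)
--     count = 0
--     greater_before = [0] * n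
--     for j in range(n):
--         aj = arr[j]
--         for k in range(j + 1, n):
--             if arr[k] > aj:
--                 count += greater_before[k]
--         greater_before = [g + 1 if aj > a else g for a, g in zip(arr, greater_before)]
--     return count
-- ===== Notes on version B (the rewrite author's own statement) =====
-- stated objective: faster
-- what changed: Replaces A's per-j left/right list building plus quadratic pair scan (worst-case O(n^3)) by a single left-to-right sweep that incrementally maintains, for every k, the number of earlier elements greater than arr[k], making each j cost O(n).
import Mathlib
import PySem

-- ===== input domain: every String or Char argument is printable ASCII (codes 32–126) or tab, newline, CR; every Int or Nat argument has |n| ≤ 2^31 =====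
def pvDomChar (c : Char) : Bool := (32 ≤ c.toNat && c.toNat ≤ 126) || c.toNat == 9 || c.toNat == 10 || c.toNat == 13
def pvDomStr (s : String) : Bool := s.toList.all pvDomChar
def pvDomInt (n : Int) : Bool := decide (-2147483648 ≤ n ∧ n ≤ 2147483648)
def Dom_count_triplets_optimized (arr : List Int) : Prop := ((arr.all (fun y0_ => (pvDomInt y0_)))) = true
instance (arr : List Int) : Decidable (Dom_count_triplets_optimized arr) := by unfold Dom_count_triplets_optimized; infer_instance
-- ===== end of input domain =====

-- B replaces A's per-j left/right list building and pair scan by a single sweep that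
-- incrementally maintains per-position counts of earlier greater elements (objective: faster).

-- ===== PORT A =====
def count_triplets_optimized (arr : List Int) : Int :=
  let n : Int := arr.length
  (PySem.List.pyRange 1 (n - 1) 1).foldl (fun count j =>
    let aj := PySem.List.pyGetD arr j 0
    let left_greater := (PySem.List.pyRange 0 j 1).foldl
      (fun acc i => if PySem.List.pyGetD arr i 0 > aj then acc ++ [PySem.List.pyGetD arr i 0] else acc) []
    let right_greater := (PySem.List.pyRange (j + 1) n 1).foldl
      (fun acc k => if PySem.List.pyGetD arr k 0 > aj then acc ++ [PySem.List.pyGetD arr k 0] else acc) []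
    left_greater.foldl (fun c ai =>
      right_greater.foldl (fun c ak => if ak < ai then c + 1 else c) c) count) 0

-- ===== PORT B =====
def count_triplets_optimized_alt (arr : List Int) : Int :=
  let n : Int := arr.length
  ((PySem.List.pyRange 0 n 1).foldl (fun (st : Int × List Int) j =>
    let aj := PySem.List.pyGetD arr j 0
    let count := (PySem.List.pyRange (j + 1) n 1).foldl
      (fun c k => if PySem.List.pyGetD arr k 0 > aj then c + PySem.List.pyGetD st.2 k 0 else c) st.1
    (count, (arr.zip st.2).map (fun p => if aj > p.1 then p.2 + 1 else p.2)))
    (0, List.replicate arr.length 0)).1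

-- ===== PRECONDITION & SPEC =====
def Spec_count_triplets_optimized (arr : List Int) (out : Int) : Prop := out = count_triplets_optimized_alt arr
instance (arr : List Int) (out : Int) : Decidable (Spec_count_triplets_optimized arr out) := by unfold Spec_count_triplets_optimized; infer_instance

-- ===== CLAIM (what is proved, stated in full; the proofs are below) =====
def Claim_equal_count_triplets_optimized : Prop := ∀ (arr : List Int), Dom_count_triplets_optimized arr → Spec_count_triplets_optimized arr (count_triplets_optimized arr)

-- ===== LEMMAS AND PROOFS =====

-- per-j contribution as A computes it: each left element > arr[j] counted against the
-- smaller right elements > arr[j]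
def gA (arr : List Int) (j : Int) : Int :=
  (((arr.take j.toNat).filter (fun a => decide (PySem.List.pyGetD arr j 0 < a))).map
    (fun ai => (((arr.drop (j.toNat + 1)).filter (fun a => decide (PySem.List.pyGetD arr j 0 < a))).countP
      (fun ak => decide (ak < ai)) : Int))).sum

-- per-j contribution as B computes it: each right element > arr[j] weighted by its
-- earlier-greater count
def gB (arr : List Int) (j : Int) : Int :=
  (((arr.drop (j.toNat + 1)).filter (fun b => decide (PySem.List.pyGetD arr j 0 < b))).map
    (fun b => ((arr.take j.toNat).countP (fun x => decide (b < x)) : Int))).sum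

-- B's counter list after the first m iterations
def Gof (arr : List Int) (m : Nat) : List Int :=
  arr.map (fun a => ((arr.take m).countP (fun x => decide (a < x)) : Int))

-- exchanging the two summations of a pair count
lemma sum_countP_swap (L R : List Int) :
    (L.map (fun a => (R.countP (fun b => decide (b < a)) : Int))).sum
      = (R.map (fun b => (L.countP (fun a => decide (b < a)) : Int))).sum := by
  induction L with
  | nil => simp
  | cons a L ih =>
    simp only [List.map_cons, List.sum_cons, List.countP_cons, ih]
    push_cast
    rw [PySem.List.sum_map_add_int, PySem.List.sum_map_ite_one_zero]
    ring

lemma gA_eq_gB (arr : List Int) (j : Int) : gA arr j = gB arr j := by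
  unfold gA gB
  rw [sum_countP_swap]
  refine congrArg List.sum (List.map_congr_left ?_)
  intro b hb
  have haj : PySem.List.pyGetD arr j 0 < b := by
    have := List.of_mem_filter hb; simpa using this
  congr 1
  rw [List.countP_filter]
  apply List.countP_congr
  intro a _
  by_cases h : b < a
  · simp [h, lt_trans haj h]
  · simp [h]

lemma bodyA_eq (arr : List Int) (j count : Int) (h1 : 0 ≤ j) (h2 : j < (arr.length : Int)) :
    (let aj := PySem.List.pyGetD arr j 0
     let left_greater := (PySem.List.pyRange 0 j 1).foldl
       (fun acc i => if PySem.List.pyGetD arr i 0 > aj then acc ++ [PySem.List.pyGetD arr i 0] else acc) []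
     let right_greater := (PySem.List.pyRange (j + 1) (arr.length : Int) 1).foldl
       (fun acc k => if PySem.List.pyGetD arr k 0 > aj then acc ++ [PySem.List.pyGetD arr k 0] else acc) []
     left_greater.foldl (fun c ai => right_greater.foldl (fun c ak => if ak < ai then c + 1 else c) c) count)
    = count + gA arr j := by
  simp only []
  have hleft : (PySem.List.pyRange 0 j 1).foldl
      (fun acc i => if PySem.List.pyGetD arr i 0 > PySem.List.pyGetD arr j 0 then acc ++ [PySem.List.pyGetD arr i 0] else acc) []
      = (arr.take j.toNat).filter (fun a => decide (PySem.List.pyGetD arr j 0 < a)) := by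
    have hcongr : ∀ (acc : List Int), ∀ i ∈ PySem.List.pyRange 0 j 1,
        (if PySem.List.pyGetD arr i 0 > PySem.List.pyGetD arr j 0 then acc ++ [PySem.List.pyGetD arr i 0] else acc)
        = (if PySem.List.pyGetD (arr.take j.toNat) i 0 > PySem.List.pyGetD arr j 0 then acc ++ [PySem.List.pyGetD (arr.take j.toNat) i 0] else acc) := by
      intro acc i hi
      rw [PySem.List.mem_pyRange_one] at hi
      have he : PySem.List.pyGetD arr i 0 = PySem.List.pyGetD (arr.take j.toNat) i 0 := by
        rw [PySem.List.pyGetD_eq_getElem arr 0 hi.1 (by omega),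
            PySem.List.pyGetD_eq_getElem (arr.take j.toNat) 0 hi.1 (by simp [List.length_take]; omega)]
        rw [List.getElem_take]
      rw [he]
    rw [PySem.List.foldl_congr_mem _ _ _ _ hcongr]
    have hlen : j = ((arr.take j.toNat).length : Int) := by simp [List.length_take]; omega
    generalize haj : PySem.List.pyGetD arr j 0 = aj
    generalize ht : arr.take j.toNat = t at hlen ⊢
    rw [hlen]
    have hfold := PySem.List.foldl_pyRange_zero_pyGetD' t 0
      (fun acc a => if a > aj then acc ++ [a] else acc) []
    simp only [] at hfold
    rw [hfold, PySem.List.foldl_append_ite_eq_filter, List.nil_append]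
  have hright : (PySem.List.pyRange (j + 1) ((arr.length : Int)) 1).foldl
      (fun acc k => if PySem.List.pyGetD arr k 0 > PySem.List.pyGetD arr j 0 then acc ++ [PySem.List.pyGetD arr k 0] else acc) []
      = (arr.drop (j.toNat + 1)).filter (fun a => decide (PySem.List.pyGetD arr j 0 < a)) := by
    have hfold := PySem.List.foldl_pyRange_pyGetD' arr 0
      (fun acc a => if a > PySem.List.pyGetD arr j 0 then acc ++ [a] else acc) [] (a := j + 1) (by omega)
    simp only [] at hfold
    rw [hfold, show (j + 1).toNat = j.toNat + 1 by omega,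
        PySem.List.foldl_append_ite_eq_filter, List.nil_append]
  rw [hleft, hright]
  have hinner : ∀ (c ai : Int),
      ((arr.drop (j.toNat + 1)).filter (fun a => decide (PySem.List.pyGetD arr j 0 < a))).foldl
        (fun c ak => if ak < ai then c + 1 else c) c
      = c + (((arr.drop (j.toNat + 1)).filter (fun a => decide (PySem.List.pyGetD arr j 0 < a))).countP
          (fun ak => decide (ak < ai)) : Int) := by
    intro c ai
    exact PySem.List.foldl_ite_add_one _ _ _
  simp only [hinner]
  rw [PySem.List.foldl_add]
  rfl

lemma A_char (arr : List Int) :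
    count_triplets_optimized arr
      = ((PySem.List.pyRange 1 ((arr.length : Int) - 1) 1).map (gA arr)).sum := by
  unfold count_triplets_optimized
  simp only []
  rw [PySem.List.foldl_congr_mem _ _ (fun count j => count + gA arr j) _ (by
    intro acc x hx
    rw [PySem.List.mem_pyRange_one] at hx
    exact bodyA_eq arr x acc (by omega) (by omega))]
  rw [PySem.List.foldl_add, zero_add]

lemma stepB_count (arr : List Int) (m : Nat) (c : Int) :
    (PySem.List.pyRange ((m : Int) + 1) (arr.length : Int) 1).foldl
      (fun c k => if PySem.List.pyGetD arr k 0 > PySem.List.pyGetD arr (m : Int) 0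
        then c + PySem.List.pyGetD (Gof arr m) k 0 else c) c
    = c + gB arr (m : Int) := by
  have hcongr : ∀ (acc : Int), ∀ k ∈ PySem.List.pyRange ((m : Int) + 1) (arr.length : Int) 1,
      (if PySem.List.pyGetD arr k 0 > PySem.List.pyGetD arr (m : Int) 0
        then acc + PySem.List.pyGetD (Gof arr m) k 0 else acc)
      = (if PySem.List.pyGetD arr k 0 > PySem.List.pyGetD arr (m : Int) 0
        then acc + ((arr.take m).countP (fun x => decide (PySem.List.pyGetD arr k 0 < x)) : Int) else acc) := by
    intro acc k hk
    rw [PySem.List.mem_pyRange_one] at hk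
    have hG : PySem.List.pyGetD (Gof arr m) k 0
        = ((arr.take m).countP (fun x => decide (PySem.List.pyGetD arr k 0 < x)) : Int) := by
      rw [PySem.List.pyGetD_eq_getElem (Gof arr m) 0 (by omega) (by simp [Gof]; omega),
          PySem.List.pyGetD_eq_getElem arr 0 (by omega) (by omega)]
      simp [Gof]
    rw [hG]
  rw [PySem.List.foldl_congr_mem _ _ _ _ hcongr]
  have hfold := PySem.List.foldl_pyRange_pyGetD' arr 0
    (fun acc a => if a > PySem.List.pyGetD arr (m : Int) 0
      then acc + ((arr.take m).countP (fun x => decide (a < x)) : Int) else acc) c (a := (m : Int) + 1) (by omega)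
  simp only [] at hfold
  rw [hfold, show ((m : Int) + 1).toNat = m + 1 by omega]
  rw [PySem.List.foldl_ite_eq_foldl_filter, PySem.List.foldl_add]
  simp [gB]

lemma Gof_succ (arr : List Int) (m : Nat) (hm : m < arr.length) :
    (arr.zip (Gof arr m)).map
      (fun p => if PySem.List.pyGetD arr (m : Int) 0 > p.1 then p.2 + 1 else p.2)
    = Gof arr (m + 1) := by
  have haj : PySem.List.pyGetD arr (m : Int) 0 = arr[m] := by
    rw [PySem.List.pyGetD_eq_getElem arr 0 (by omega) (by omega)]; simp
  have hzipgen : ∀ (l : List Int) (f : Int → Int), l.zip (l.map f) = l.map (fun a => (a, f a)) := by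
    intro l f
    induction l with
    | nil => rfl
    | cons x t ih => simp [ih]
  have hzip : arr.zip (Gof arr m)
      = arr.map (fun a => (a, ((arr.take m).countP (fun x => decide (a < x)) : Int))) := by
    rw [Gof, hzipgen]
  rw [hzip, List.map_map, Gof]
  apply List.map_congr_left
  intro a _
  simp only [Function.comp]
  rw [List.take_add_one]
  have : arr[m]?.toList = [arr[m]] := by simp [List.getElem?_eq_getElem hm]
  rw [this, List.countP_append, haj]
  by_cases h : a < arr[m]
  · simp [h]
  · simp [h]

lemma B_loop (arr : List Int) (m : Nat) (hm : m ≤ arr.length) (c : Int) :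
    ((PySem.List.pyRange (m : Int) (arr.length : Int) 1).foldl (fun (st : Int × List Int) j =>
      let aj := PySem.List.pyGetD arr j 0
      let count := (PySem.List.pyRange (j + 1) (arr.length : Int) 1).foldl
        (fun c k => if PySem.List.pyGetD arr k 0 > aj then c + PySem.List.pyGetD st.2 k 0 else c) st.1
      (count, (arr.zip st.2).map (fun p => if aj > p.1 then p.2 + 1 else p.2)))
      (c, Gof arr m)).1
    = c + ((PySem.List.pyRange (m : Int) (arr.length : Int) 1).map (gB arr)).sum := by
  induction hfuel : arr.length - m generalizing m c with
  | zero =>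
    rw [PySem.List.pyRange_one_eq_nil (by omega)]
    simp
  | succ d ih =>
    have hm' : m < arr.length := by omega
    rw [PySem.List.pyRange_one_cons (by exact_mod_cast hm')]
    simp only [List.foldl_cons, List.map_cons, List.sum_cons]
    rw [stepB_count arr m c, Gof_succ arr m hm']
    rw [show ((m : Int) + 1) = ((m + 1 : Nat) : Int) by push_cast; ring]
    rw [ih (m + 1) (by omega) (c + gB arr (m : Int)) (by omega)]
    ring

lemma B_char (arr : List Int) :
    count_triplets_optimized_alt arr
      = ((PySem.List.pyRange 0 (arr.length : Int) 1).map (gB arr)).sum := by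
  unfold count_triplets_optimized_alt
  simp only []
  have h0 : List.replicate arr.length (0 : Int) = Gof arr 0 := by
    simp [Gof]
  have hloop := B_loop arr 0 (by omega) 0
  simp only [Nat.cast_zero] at hloop
  rw [h0, hloop, zero_add]

lemma gB_zero (arr : List Int) : gB arr 0 = 0 := by
  simp [gB]

lemma gB_last (arr : List Int) (h : 1 ≤ arr.length) : gB arr ((arr.length : Int) - 1) = 0 := by
  simp only [gB]
  rw [show ((arr.length : Int) - 1).toNat + 1 = arr.length from by omega]
  simp

-- the extra endpoints j = 0 and j = n-1 that B's sweep visits contribute nothing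
lemma sum_range_ext (arr : List Int) :
    ((PySem.List.pyRange 1 ((arr.length : Int) - 1) 1).map (gB arr)).sum
      = ((PySem.List.pyRange 0 (arr.length : Int) 1).map (gB arr)).sum := by
  by_cases h0 : arr.length = 0
  · rw [PySem.List.pyRange_one_eq_nil (by omega), PySem.List.pyRange_one_eq_nil (by omega)]
  · rw [PySem.List.pyRange_one_cons (show (0 : Int) < (arr.length : Int) by omega)]
    simp only [List.map_cons, List.sum_cons]
    rw [gB_zero, zero_add]
    by_cases h1 : arr.length = 1
    · rw [PySem.List.pyRange_one_eq_nil (by omega), PySem.List.pyRange_one_eq_nil (by omega)]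
    · conv_rhs => rw [show (arr.length : Int) = ((arr.length : Int) - 1) + 1 from by ring]
      rw [PySem.List.pyRange_one_succ_right (by omega)]
      rw [List.map_append, List.sum_append]
      simp [gB_last arr (by omega)]

-- ===== VERDICT (by name: the statement is the Claim_ definition above) =====
theorem count_triplets_optimized_spec : Claim_equal_count_triplets_optimized := by
  intro arr _
  show count_triplets_optimized arr = count_triplets_optimized_alt arr
  rw [A_char, B_char, ← sum_range_ext]
  exact congrArg List.sum (List.map_congr_left (fun j _ => gA_eq_gB arr j))
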